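-- pv_equiv track=rewrite | github.com/sudh29/StringAlgorithms | 5_Checking_valid_shuffle_of_two_Strings.py | validShuffle
-- ===== SOURCE A (Python) =====
-- def validShuffle(str1, str2, shuffle):
--     n1 = len(str1)
--     n2 = len(str2)
--     n = len(shuffle)
--     if n != n1 + n2:
--         return False
--
--     freq = dict()
--     for i in range(n1):
--         freq[str1[i]] = freq.get(str1[i],0)+1
--     for i in range(n2):
--         freq[str2[i]] = freq.get(str2[i],0)+1
--
--     for i in range(n):
--         if shuffle[i] in freq:
--             freq[shuffle[i]] -= 1
--         else:
--             return False
--     for key, value in freq.items():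
--         if(value != 0):
--             return False
--     return True
-- ===== SOURCE B (Python) =====
-- def validShuffle(str1, str2, shuffle):
--     return sorted(str1 + str2) == sorted(shuffle)
-- ===== Notes on version B (the rewrite author's own statement) =====
-- stated objective: simpler
-- what changed: Replaced the length check plus frequency-dictionary build/decrement/verify passes with a single sort-and-compare: sorted(str1+str2) == sorted(shuffle).
import Mathlib
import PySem

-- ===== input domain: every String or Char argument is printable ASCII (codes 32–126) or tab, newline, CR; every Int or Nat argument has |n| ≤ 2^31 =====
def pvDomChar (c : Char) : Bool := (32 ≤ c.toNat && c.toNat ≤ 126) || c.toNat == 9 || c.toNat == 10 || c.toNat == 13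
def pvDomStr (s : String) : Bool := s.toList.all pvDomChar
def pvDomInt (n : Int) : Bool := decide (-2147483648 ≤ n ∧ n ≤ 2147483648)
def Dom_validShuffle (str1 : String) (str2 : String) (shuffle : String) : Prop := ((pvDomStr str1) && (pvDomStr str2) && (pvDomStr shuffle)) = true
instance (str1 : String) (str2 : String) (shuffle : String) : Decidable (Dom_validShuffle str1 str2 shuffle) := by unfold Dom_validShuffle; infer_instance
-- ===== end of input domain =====

-- One honest line: B replaces A's frequency-dictionary passes by a single sort-and-compare (simpler, same result).


-- ===== PORT A =====
-- 'for i in range(nk): freq[strk[i]] = freq.get(strk[i],0)+1', folded over the characters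
def pvCountLoop (l : List Char) (d : PySem.Dict Char Int) : PySem.Dict Char Int :=
  l.foldl (fun d c => d.insert c (d.getD c 0 + 1)) d

-- third loop body: 'if shuffle[i] in freq: freq[shuffle[i]] -= 1 else: return False' (none = early False)
def pvDecStep (od : Option (PySem.Dict Char Int)) (c : Char) : Option (PySem.Dict Char Int) :=
  od.bind (fun d => if d.contains c then some (d.insert c (d.getD c 0 - 1)) else none)

def validShuffle (str1 : String) (str2 : String) (shuffle : String) : Bool :=
  if shuffle.toList.length ≠ str1.toList.length + str2.toList.length then false
  else
    match shuffle.toList.foldl pvDecStep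
        (some (pvCountLoop str2.toList (pvCountLoop str1.toList PySem.Dict.empty))) with
    | none => false
    | some d => d.items.all (fun p => p.2 == 0)   -- 'for key, value in freq.items(): if value != 0: return False' then True

-- ===== PORT B =====
-- Source B: return sorted(str1 + str2) == sorted(shuffle)
def validShuffle_alt (str1 : String) (str2 : String) (shuffle : String) : Bool :=
  PySem.List.sorted (str1.toList ++ str2.toList) (fun x => x) false
    == PySem.List.sorted shuffle.toList (fun x => x) false

-- ===== PRECONDITION & SPEC =====
def Spec_validShuffle (str1 : String) (str2 : String) (shuffle : String) (out : Bool) : Prop := out = validShuffle_alt str1 str2 shuffle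
instance (str1 : String) (str2 : String) (shuffle : String) (out : Bool) : Decidable (Spec_validShuffle str1 str2 shuffle out) := by unfold Spec_validShuffle; infer_instance

-- ===== CLAIM (what is proved, stated in full; the proofs are below) =====
def Claim_equal_validShuffle : Prop := ∀ (str1 : String) (str2 : String) (shuffle : String), Dom_validShuffle str1 str2 shuffle → Spec_validShuffle str1 str2 shuffle (validShuffle str1 str2 shuffle)

-- ===== LEMMAS AND PROOFS =====

-- getD through the decrement loop
theorem pv_getD_dec (l : List Char) (d : PySem.Dict Char Int) (v : Char) :
    (l.foldl (fun d c => d.insert c (d.getD c 0 - 1)) d).getD v 0 = d.getD v 0 - l.count v := by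
  induction l generalizing d with
  | nil => simp
  | cons x xs ih =>
    simp only [List.foldl_cons, ih, List.count_cons]
    rw [PySem.Dict.getD_insert]
    by_cases h : v = x
    · subst h; simp; omega
    · simp [h, Ne.symm h]

theorem pv_decfold_none (sh : List Char) : sh.foldl pvDecStep none = none := by
  induction sh with
  | nil => rfl
  | cons c cs ih => simpa [pvDecStep] using ih

-- the early-return loop, characterised: it succeeds iff every shuffled char is a key
theorem pv_decfold (sh : List Char) (d : PySem.Dict Char Int) :
    sh.foldl pvDecStep (some d) =
      if sh.all (fun c => d.contains c) then
        some (sh.foldl (fun d c => d.insert c (d.getD c 0 - 1)) d)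
      else none := by
  induction sh generalizing d with
  | nil => simp
  | cons c cs ih =>
    by_cases hc : d.contains c = true
    · have hkeys : ∀ k, (d.insert c (d.getD c 0 - 1)).contains k = d.contains k := by
        intro k
        rw [PySem.Dict.contains_insert]
        by_cases hk : (k == c) = true
        · simp [hk, (beq_iff_eq.mp hk ▸ hc : d.contains k = true)]
        · simp [hk]
      simp only [List.foldl_cons, pvDecStep, Option.bind_some, hc, if_pos, ih]
      have hall : cs.all (fun x => (d.insert c (d.getD c 0 - 1)).contains x)
          = cs.all (fun x => d.contains x) := by
        simp only [hkeys]
      simp [List.all_cons, hc, hall]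
    · simp [List.foldl_cons, pvDecStep, hc, pv_decfold_none]

theorem pv_update_of_subset (xs s : List Char) (h : ∀ x ∈ xs, x ∈ s) :
    PySem.Set.update s xs = s := by
  induction xs generalizing s with
  | nil => rfl
  | cons x t ih =>
    have : PySem.Set.add s x = s := by
      simp [PySem.Set.add, PySem.Set.contains, h x List.mem_cons_self]
    simp only [PySem.Set.update, List.foldl_cons]
    rw [show List.foldl PySem.Set.add (PySem.Set.add s x) t = PySem.Set.update (PySem.Set.add s x) t from rfl]
    rw [this]
    exact ih s (fun y hy => h y (by simp [hy]))

-- A, characterised as a proposition about counts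
theorem pv_A_iff (str1 str2 shuffle : String) :
    validShuffle str1 str2 shuffle = true ↔
      (shuffle.toList.length = str1.toList.length + str2.toList.length ∧
       (∀ c ∈ shuffle.toList, c ∈ str1.toList ++ str2.toList) ∧
       (∀ c ∈ str1.toList ++ str2.toList,
         ((str1.toList ++ str2.toList).count c : Int) = shuffle.toList.count c)) := by
  have hfreq : pvCountLoop str2.toList (pvCountLoop str1.toList PySem.Dict.empty)
      = (str1.toList ++ str2.toList).foldl (fun d c => d.insert c (d.getD c 0 + 1))
          (PySem.Dict.empty : PySem.Dict Char Int) := by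
    simp [pvCountLoop, List.foldl_append]
  have hgetD : ∀ v, (pvCountLoop str2.toList (pvCountLoop str1.toList PySem.Dict.empty)).getD v 0
      = ((str1.toList ++ str2.toList).count v : Int) := by
    intro v; rw [hfreq, PySem.Dict.getD_foldl_insert_add_one]; simp
  have hkeys : (pvCountLoop str2.toList (pvCountLoop str1.toList PySem.Dict.empty)).keys
      = PySem.Set.ofList (str1.toList ++ str2.toList) := by
    rw [hfreq, PySem.Dict.keys_foldl_insert]
    simp [PySem.Dict.keys_empty, PySem.Set.ofList_eq_foldl, PySem.Set.update]
  have hnodup : (pvCountLoop str2.toList (pvCountLoop str1.toList PySem.Dict.empty)).keys.Nodup := by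
    rw [hfreq]; exact PySem.Dict.nodup_keys_foldl_insert _ _ _ PySem.Dict.nodup_keys_empty
  have hcont : ∀ c, (pvCountLoop str2.toList (pvCountLoop str1.toList PySem.Dict.empty)).contains c
      = decide (c ∈ str1.toList ++ str2.toList) := by
    intro c
    rw [PySem.Dict.contains_eq_decide_mem_keys, hkeys]
    simp [PySem.Set.mem_ofList]
  by_cases hlen : shuffle.toList.length = str1.toList.length + str2.toList.length
  · by_cases hall : shuffle.toList.all
        (fun c => (pvCountLoop str2.toList (pvCountLoop str1.toList PySem.Dict.empty)).contains c) = true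
    · have hmem : ∀ c ∈ shuffle.toList, c ∈ str1.toList ++ str2.toList := by
        intro c hc
        have := (List.all_eq_true.mp hall) c hc
        rw [hcont] at this; exact of_decide_eq_true this
      have hd'getD : ∀ v, (shuffle.toList.foldl (fun d c => d.insert c (d.getD c 0 - 1))
            (pvCountLoop str2.toList (pvCountLoop str1.toList PySem.Dict.empty))).getD v 0
          = ((str1.toList ++ str2.toList).count v : Int) - shuffle.toList.count v := by
        intro v; rw [pv_getD_dec, hgetD]
      have hd'keys : (shuffle.toList.foldl (fun d c => d.insert c (d.getD c 0 - 1))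
            (pvCountLoop str2.toList (pvCountLoop str1.toList PySem.Dict.empty))).keys
          = PySem.Set.ofList (str1.toList ++ str2.toList) := by
        rw [PySem.Dict.keys_foldl_insert, hkeys, pv_update_of_subset]
        intro x hx
        simpa [PySem.Set.mem_ofList] using hmem x hx
      have hd'nodup : (shuffle.toList.foldl (fun d c => d.insert c (d.getD c 0 - 1))
            (pvCountLoop str2.toList (pvCountLoop str1.toList PySem.Dict.empty))).keys.Nodup := by
        rw [hd'keys]; rw [hkeys] at hnodup; exact hnodup
      have hred : validShuffle str1 str2 shuffle
          = (shuffle.toList.foldl (fun d c => d.insert c (d.getD c 0 - 1))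
              (pvCountLoop str2.toList (pvCountLoop str1.toList PySem.Dict.empty))).items.all
              (fun p => p.2 == 0) := by
        unfold validShuffle
        rw [if_neg (not_not_intro hlen), pv_decfold, if_pos hall]
      rw [hred, PySem.Dict.items_eq_map_keys _ hd'nodup 0]
      constructor
      · intro h
        refine ⟨hlen, hmem, ?_⟩
        intro c hc
        have hck : c ∈ (shuffle.toList.foldl (fun d c => d.insert c (d.getD c 0 - 1))
            (pvCountLoop str2.toList (pvCountLoop str1.toList PySem.Dict.empty))).keys := by
          rw [hd'keys]; simpa [PySem.Set.mem_ofList] using hc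
        have := (List.all_eq_true.mp h) _ (List.mem_map.mpr ⟨c, hck, rfl⟩)
        have hz := hd'getD c
        simp only [beq_iff_eq] at this
        rw [this] at hz
        omega
      · rintro ⟨-, -, hcnt⟩
        apply List.all_eq_true.mpr
        intro p hp
        obtain ⟨c, hck, rfl⟩ := List.mem_map.mp hp
        have hct : c ∈ str1.toList ++ str2.toList := by
          rw [hd'keys] at hck; simpa [PySem.Set.mem_ofList] using hck
        have hc2 := hcnt c hct
        simp only [beq_iff_eq, hd'getD c]
        omega
    · have hred : validShuffle str1 str2 shuffle = false := by
        unfold validShuffle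
        rw [if_neg (not_not_intro hlen), pv_decfold, if_neg (by simpa using hall)]
      rw [hred]
      constructor
      · intro h; exact absurd h (by simp)
      · rintro ⟨-, hmem, -⟩
        exfalso; apply hall
        apply List.all_eq_true.mpr
        intro c hc
        rw [hcont c]; exact decide_eq_true (hmem c hc)
  · have hred : validShuffle str1 str2 shuffle = false := by
      unfold validShuffle; rw [if_pos hlen]
    rw [hred]
    constructor
    · intro h; exact absurd h (by simp)
    · rintro ⟨h, -, -⟩; exact absurd h hlen

-- B, characterised as a permutation
theorem pv_B_iff (str1 str2 shuffle : String) :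
    validShuffle_alt str1 str2 shuffle = true ↔
      (str1.toList ++ str2.toList).Perm shuffle.toList := by
  unfold validShuffle_alt
  rw [beq_iff_eq, PySem.List.sorted_id_eq_sorted_id_iff_perm]

-- ===== VERDICT (by name: the statement is the Claim_ definition above) =====
theorem validShuffle_spec : Claim_equal_validShuffle := by
  intro str1 str2 shuffle _
  unfold Spec_validShuffle
  rw [Bool.eq_iff_iff, pv_A_iff, pv_B_iff]
  constructor
  · rintro ⟨hlen, hmem, hcnt⟩
    rw [List.perm_iff_count]
    intro c
    by_cases hc : c ∈ str1.toList ++ str2.toList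
    · exact_mod_cast hcnt c hc
    · have h1 : (str1.toList ++ str2.toList).count c = 0 := List.count_eq_zero.mpr hc
      have h2 : shuffle.toList.count c = 0 := List.count_eq_zero.mpr (fun h => hc (hmem c h))
      rw [h1, h2]
  · intro hp
    refine ⟨?_, ?_, ?_⟩
    · have := hp.length_eq
      simp only [List.length_append] at this
      omega
    · intro c hc; exact (hp.mem_iff).mpr hc
    · intro c _; exact_mod_cast hp.count_eq c
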